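-- pv_equiv track=rewrite | github.com/papai-sadhukhan/AI_Call_Transcription | utils/customer_registry.py | _join_spelled_letters
-- ===== SOURCE A (Python) =====
-- def _join_spelled_letters(text: str) -> str:
-- 	# Joins single-letter tokens into possible names
-- 	tokens = text.split()
-- 	joined = []
-- 	buffer = []
-- 	for t in tokens:
-- 		if len(t) == 1 and t.isalpha():
-- 			buffer.append(t)
-- 		else:
-- 			if buffer:
-- 				joined.append("".join(buffer))
-- 				buffer = []
-- 			joined.append(t)
-- 	if buffer:
-- 		joined.append("".join(buffer))
-- 	return " ".join(joined)
-- ===== SOURCE B (Python) =====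
-- def _join_spelled_letters(text: str) -> str:
--     # Run-detection scan: find each maximal run of same-kind tokens with a
--     # forward pointer, emit it whole (joined if single letters), no buffer.
--     tokens = text.split()
--
--     def is_letter(t):
--         return len(t) == 1 and t.isalpha()
--
--     out = []
--     i = 0
--     n = len(tokens)
--     while i < n:
--         k = is_letter(tokens[i])
--         j = i + 1
--         while j < n and is_letter(tokens[j]) == k:
--             j += 1
--         if k:
--             out.append("".join(tokens[i:j]))
--         else:
--             out.extend(tokens[i:j])
--         i = j
--     return " ".join(out)
-- ===== Notes on version B (the rewrite author's own statement) =====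
-- stated objective: alternative
-- what changed: Replaces A's buffer-threading pass (append to a pending buffer, flush at each non-letter and at the end) with a groupby-style two-pointer scan that finds each maximal run of same-kind tokens and emits it whole, with no buffer state and no trailing flush.
import Mathlib
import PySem

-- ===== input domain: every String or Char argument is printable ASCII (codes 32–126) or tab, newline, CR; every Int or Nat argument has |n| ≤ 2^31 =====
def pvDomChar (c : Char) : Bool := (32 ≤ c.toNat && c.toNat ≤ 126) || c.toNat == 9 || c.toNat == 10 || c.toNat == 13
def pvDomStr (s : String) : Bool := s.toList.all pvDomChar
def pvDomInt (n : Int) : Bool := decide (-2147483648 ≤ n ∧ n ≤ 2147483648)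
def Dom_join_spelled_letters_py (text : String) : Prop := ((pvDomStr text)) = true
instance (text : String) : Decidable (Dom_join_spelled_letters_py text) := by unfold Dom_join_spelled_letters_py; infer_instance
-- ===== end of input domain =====

-- B replaces A's pending-buffer pass by a groupby-style maximal-run scan; objective: alternative (same cost).

-- shared predicate: len(t) == 1 and t.isalpha()
def pvIsLetterTok (t : String) : Bool :=
  PySem.Str.len t == 1 && PySem.Str.strIsalpha t

-- ===== PORT A =====
def join_spelled_letters_py (text : String) : String :=
  let tokens := PySem.Str.split₀ text
  let st := tokens.foldl
    (fun (s : List String × List String) t =>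
      if pvIsLetterTok t then (s.1, s.2 ++ [t])
      else
        let joined := if s.2 = [] then s.1 else s.1 ++ [PySem.Str.join "" s.2]
        (joined ++ [t], []))
    ([], [])
  let joined := if st.2 = [] then st.1 else st.1 ++ [PySem.Str.join "" st.2]
  PySem.Str.join " " joined

-- ===== PORT B =====
-- transcription of Source B's while loop: each step takes one maximal run of
-- same-kind tokens (forward scan = takeWhile), emits it, and continues after it.
def pvRunScan (tokens : List String) : List String :=
  match tokens with
  | [] => []
  | t :: ts =>
    let k := pvIsLetterTok t
    let run := t :: ts.takeWhile (fun x => pvIsLetterTok x == k)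
    (if k then [PySem.Str.join "" run] else run) ++
      pvRunScan (ts.dropWhile (fun x => pvIsLetterTok x == k))
termination_by tokens.length
decreasing_by simpa using Nat.lt_succ_of_le (List.length_dropWhile_le _ _)

def join_spelled_letters_py_alt (text : String) : String :=
  PySem.Str.join " " (pvRunScan (PySem.Str.split₀ text))

-- ===== PRECONDITION & SPEC =====
def Spec_join_spelled_letters_py (text : String) (out : String) : Prop := out = join_spelled_letters_py_alt text
instance (text : String) (out : String) : Decidable (Spec_join_spelled_letters_py text out) := by unfold Spec_join_spelled_letters_py; infer_instance

-- ===== CLAIM (what is proved, stated in full; the proofs are below) =====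
def Claim_equal_join_spelled_letters_py : Prop := ∀ (text : String), Dom_join_spelled_letters_py text → Spec_join_spelled_letters_py text (join_spelled_letters_py text)

-- ===== LEMMAS AND PROOFS =====

-- reference function: A's loop with pending buffer b, flush included
def pvFlush (b : List String) : List String :=
  if b = [] then [] else [PySem.Str.join "" b]

def pvF (b : List String) : List String → List String
  | [] => pvFlush b
  | t :: ts =>
    if pvIsLetterTok t then pvF (b ++ [t]) ts
    else pvFlush b ++ t :: pvF [] ts

lemma pvA_eq_F (ts : List String) : ∀ j b : List String,
    (let st := ts.foldl
      (fun (s : List String × List String) t =>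
        if pvIsLetterTok t then (s.1, s.2 ++ [t])
        else
          let joined := if s.2 = [] then s.1 else s.1 ++ [PySem.Str.join "" s.2]
          (joined ++ [t], []))
      (j, b);
     if st.2 = [] then st.1 else st.1 ++ [PySem.Str.join "" st.2]) = j ++ pvF b ts := by
  induction ts with
  | nil =>
    intro j b
    simp only [List.foldl_nil, pvF, pvFlush]
    split <;> simp_all
  | cons t ts ih =>
    intro j b
    simp only [List.foldl_cons, pvF]
    by_cases h : pvIsLetterTok t = true
    · simp only [h, if_pos]
      exact ih j (b ++ [t])
    · simp only [Bool.not_eq_true] at h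
      simp only [h, Bool.false_eq_true, if_false]
      rw [ih]
      by_cases hb : b = []
      · simp [hb, pvFlush]
      · simp [hb, pvFlush]

-- with empty buffer, non-letter tokens pass through until the first letter token
lemma pvF_nil_split (us : List String) :
    pvF [] us = us.takeWhile (fun x => pvIsLetterTok x == false) ++
      pvF [] (us.dropWhile (fun x => pvIsLetterTok x == false)) := by
  induction us with
  | nil => simp [pvF, pvFlush]
  | cons u us ih =>
    by_cases h : pvIsLetterTok u = true
    · simp [h]
    · simp only [Bool.not_eq_true] at h
      simp only [pvF, h, List.takeWhile_cons, List.dropWhile_cons, beq_self_eq_true, if_pos,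
        Bool.false_eq_true, if_false, pvFlush, List.nil_append, List.cons_append]
      exact congrArg (u :: ·) ih

-- with a nonempty buffer, letter tokens accumulate until the run ends, then one joined token
lemma pvF_buf_run (us : List String) : ∀ b : List String, b ≠ [] →
    pvF b us = PySem.Str.join "" (b ++ us.takeWhile (fun x => pvIsLetterTok x)) ::
      pvF [] (us.dropWhile (fun x => pvIsLetterTok x)) := by
  induction us with
  | nil => intro b hb; simp [pvF, pvFlush, hb]
  | cons u us ih =>
    intro b hb
    by_cases h : pvIsLetterTok u = true
    · simp only [pvF, h, if_pos, List.takeWhile_cons, List.dropWhile_cons]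
      rw [ih (b ++ [u]) (by simp)]
      simp
    · simp only [Bool.not_eq_true] at h
      simp only [pvF, h, Bool.false_eq_true, if_false, List.takeWhile_cons, List.dropWhile_cons,
        pvFlush, hb, List.append_nil]
      rw [pvF_nil_split us]
      simp

theorem pvRunScan_eq_F : ∀ ts : List String, pvRunScan ts = pvF [] ts
  | [] => by simp [pvRunScan, pvF, pvFlush]
  | t :: ts => by
    rw [pvRunScan]
    have hrec := pvRunScan_eq_F (ts.dropWhile (fun x => pvIsLetterTok x == pvIsLetterTok t))
    by_cases h : pvIsLetterTok t = true
    · rw [h] at hrec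
      simp only [h, if_pos]
      rw [hrec]
      rw [show pvF [] (t :: ts) = pvF [t] ts by simp [pvF, h]]
      rw [pvF_buf_run ts [t] (by simp)]
      simp only [beq_true, List.singleton_append]
    · simp only [Bool.not_eq_true] at h
      rw [h] at hrec
      simp only [h, Bool.false_eq_true, if_false]
      rw [hrec]
      rw [show pvF [] (t :: ts) = t :: pvF [] ts from by simp [pvF, pvFlush, h]]
      rw [pvF_nil_split ts]
      simp only [List.cons_append]
termination_by ts => ts.length
decreasing_by simpa using Nat.lt_succ_of_le (List.length_dropWhile_le _ _)

-- ===== VERDICT (by name: the statement is the Claim_ definition above) =====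
theorem join_spelled_letters_py_spec : Claim_equal_join_spelled_letters_py := by
  intro text _
  unfold Spec_join_spelled_letters_py join_spelled_letters_py join_spelled_letters_py_alt
  rw [pvRunScan_eq_F]
  exact congrArg (PySem.Str.join " ") (pvA_eq_F (PySem.Str.split₀ text) [] [])
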